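-- pv_equiv track=rewrite | github.com/aaaronmiller/datakiln | backend/app/services/query_optimizer.py | _is_linear_flow
-- ===== SOURCE A (Python) =====
-- from typing import Dict, List, Any, Optional, Tuple, Set, Union
-- from collections import defaultdict, deque
--
-- def _is_linear_flow(edges: List[Dict[str, Any]]) -> bool:
--     """Check if the graph represents a linear flow."""
--     if not edges:
--         return True
--
--     # Build adjacency list
--     outgoing = defaultdict(list)
--     incoming = defaultdict(list)
--
--     for edge in edges:
--         source = edge.get('source')
--         target = edge.get('target')
--         if source and target:
--             outgoing[source].append(target)
--             incoming[target].append(source)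
--
--     # Check if each node has at most one outgoing and one incoming edge
--     for node_id in set(list(outgoing.keys()) + list(incoming.keys())):
--         if len(outgoing[node_id]) > 1 or len(incoming[node_id]) > 1:
--             return False
--
--     return True
-- ===== SOURCE B (Python) =====
-- from typing import Dict, List, Any
--
-- def _is_linear_flow(edges: List[Dict[str, Any]]) -> bool:
--     """Check if the graph represents a linear flow (single pass, early exit)."""
--     seen_sources = set()
--     seen_targets = set()
--     for edge in edges:
--         source = edge.get('source')
--         target = edge.get('target')
--         if source and target:
--             if source in seen_sources or target in seen_targets:
--                 return False
--             seen_sources.add(source)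
--             seen_targets.add(target)
--     return True
-- ===== Notes on version B (the rewrite author's own statement) =====
-- stated objective: simpler
-- what changed: Replaced the two-phase build-adjacency-dicts-then-scan-node-set algorithm by a single pass over edges maintaining two seen-sets with early exit on the first repeated source or target.
import Mathlib
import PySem

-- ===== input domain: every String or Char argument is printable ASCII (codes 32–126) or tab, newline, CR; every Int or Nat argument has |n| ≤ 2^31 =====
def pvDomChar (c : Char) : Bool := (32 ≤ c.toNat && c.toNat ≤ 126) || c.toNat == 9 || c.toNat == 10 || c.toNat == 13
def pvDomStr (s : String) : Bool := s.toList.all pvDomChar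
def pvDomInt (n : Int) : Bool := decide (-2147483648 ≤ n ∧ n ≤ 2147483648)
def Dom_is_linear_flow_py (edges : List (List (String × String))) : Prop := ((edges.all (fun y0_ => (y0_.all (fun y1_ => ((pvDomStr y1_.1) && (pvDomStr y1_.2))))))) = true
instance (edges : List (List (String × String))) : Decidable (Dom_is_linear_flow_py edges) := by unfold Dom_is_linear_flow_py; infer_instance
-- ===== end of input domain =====

-- B fuses A's adjacency-dict build and the separate node-set degree scan into one
-- early-exit pass over the edges keeping two seen-sets; return values are proved equal.


-- ===== PORT A =====
-- one step of A's adjacency-building loop: edge.get('source')/edge.get('target'),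
-- the 'if source and target' truthiness guard, then defaultdict-append on both dicts
def pvStepA (st : PySem.Dict String (List String) × PySem.Dict String (List String))
    (edge : List (String × String)) :
    PySem.Dict String (List String) × PySem.Dict String (List String) :=
  match (PySem.Dict.mk edge).get? "source", (PySem.Dict.mk edge).get? "target" with
  | some s, some t =>
      if s ≠ "" && t ≠ "" then
        (st.1.modify s [] (fun l => l ++ [t]), st.2.modify t [] (fun l => l ++ [s]))
      else st
  | _, _ => st

def is_linear_flow_py (edges : List (List (String × String))) : Bool :=
  if edges = [] then true
  else
    let oi := edges.foldl pvStepA (PySem.Dict.mk [], PySem.Dict.mk [])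
    let nodes := PySem.Set.ofList (oi.1.keys ++ oi.2.keys)
    -- 'for node_id in nodes: if len(...) > 1 or len(...) > 1: return False' / 'return True'
    if nodes.any (fun n => (oi.1.getD n []).length > 1 || (oi.2.getD n []).length > 1)
    then false else true

-- ===== PORT B =====
-- B's single pass: two seen-sets, early exit on a repeated source or target
def pvLinLoop (seenS seenT : PySem.Set String) :
    List (List (String × String)) → Bool
  | [] => true
  | edge :: rest =>
      match (PySem.Dict.mk edge).get? "source", (PySem.Dict.mk edge).get? "target" with
      | some s, some t =>
          if s ≠ "" && t ≠ "" then
            if seenS.contains s || seenT.contains t then false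
            else pvLinLoop (seenS.add s) (seenT.add t) rest
          else pvLinLoop seenS seenT rest
      | _, _ => pvLinLoop seenS seenT rest

def is_linear_flow_py_alt (edges : List (List (String × String))) : Bool :=
  pvLinLoop [] [] edges

-- ===== PRECONDITION & SPEC =====
def Spec_is_linear_flow_py (edges : List (List (String × String))) (out : Bool) : Prop := out = is_linear_flow_py_alt edges
instance (edges : List (List (String × String))) (out : Bool) : Decidable (Spec_is_linear_flow_py edges out) := by unfold Spec_is_linear_flow_py; infer_instance

-- ===== CLAIM (what is proved, stated in full; the proofs are below) =====
def Claim_equal_is_linear_flow_py : Prop := ∀ (edges : List (List (String × String))), Dom_is_linear_flow_py edges → Spec_is_linear_flow_py edges (is_linear_flow_py edges)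

-- ===== LEMMAS AND PROOFS =====

-- the (source, target) pairs both programs actually keep, in edge order
def pvKept (edges : List (List (String × String))) : List (String × String) :=
  edges.filterMap (fun edge =>
    match (PySem.Dict.mk edge).get? "source", (PySem.Dict.mk edge).get? "target" with
    | some s, some t => if s ≠ "" && t ≠ "" then some (s, t) else none
    | _, _ => none)

-- A's fold over raw edges is the modify-append fold over the kept pairs, per component
lemma foldA_eq (edges : List (List (String × String)))
    (o i : PySem.Dict String (List String)) :
    edges.foldl pvStepA (o, i) =
      ((pvKept edges).foldl (fun d p => d.modify p.1 [] (fun l => l ++ [p.2])) o,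
       (pvKept edges).foldl (fun d p => d.modify p.2 [] (fun l => l ++ [p.1])) i) := by
  induction edges generalizing o i with
  | nil => simp [pvKept]
  | cons e rest ih =>
      rw [List.foldl_cons]
      cases hs : (PySem.Dict.mk e).get? "source" with
      | none =>
          have hstep : pvStepA (o, i) e = (o, i) := by simp [pvStepA, hs]
          have hkept : pvKept (e :: rest) = pvKept rest := by
            simp [pvKept, hs]
          rw [hstep, hkept, ih]
      | some s =>
        cases ht : (PySem.Dict.mk e).get? "target" with
        | none =>
            have hstep : pvStepA (o, i) e = (o, i) := by simp [pvStepA, hs, ht]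
            have hkept : pvKept (e :: rest) = pvKept rest := by
              simp [pvKept, hs, ht]
            rw [hstep, hkept, ih]
        | some t =>
          by_cases hs' : s = ""
          · have hstep : pvStepA (o, i) e = (o, i) := by simp [pvStepA, hs, ht, hs']
            have hkept : pvKept (e :: rest) = pvKept rest := by
              simp [pvKept, hs, ht, hs']
            rw [hstep, hkept, ih]
          · by_cases ht' : t = ""
            · have hstep : pvStepA (o, i) e = (o, i) := by simp [pvStepA, hs, ht, ht']
              have hkept : pvKept (e :: rest) = pvKept rest := by
                simp [pvKept, hs, ht, ht']
              rw [hstep, hkept, ih]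
            · have hstep : pvStepA (o, i) e =
                  (o.modify s [] (fun l => l ++ [t]), i.modify t [] (fun l => l ++ [s])) := by
                simp [pvStepA, hs, ht, hs', ht']
              have hkept : pvKept (e :: rest) = (s, t) :: pvKept rest := by
                simp [pvKept, hs, ht, hs', ht']
              rw [hstep, hkept, List.foldl_cons, List.foldl_cons, ih]

lemma count_countP_fst (l : List (String × String)) (n : String) :
    (l.map Prod.fst).count n = l.countP (fun p => p.1 == n) := by
  induction l with
  | nil => rfl
  | cons p rest ih =>
      by_cases h : p.1 = n <;> simp [List.count_cons, List.countP_cons, h, ih]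

lemma count_countP_snd (l : List (String × String)) (n : String) :
    (l.map Prod.snd).count n = l.countP (fun p => p.2 == n) := by
  induction l with
  | nil => rfl
  | cons p rest ih =>
      by_cases h : p.2 = n <;> simp [List.count_cons, List.countP_cons, h, ih]

-- the outgoing dict's list at n has length = multiplicity of n among kept sources
lemma getD_outgoing (edges : List (List (String × String))) (n : String) :
    (((pvKept edges).foldl (fun d p => d.modify p.1 [] (fun l => l ++ [p.2]))
        (PySem.Dict.mk [])).getD n []).length = ((pvKept edges).map Prod.fst).count n := by
  rw [PySem.Dict.getD_foldl_modify_append, count_countP_fst]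
  simp [List.countP_eq_length_filter, PySem.Dict.getD, PySem.Dict.get?]

lemma getD_incoming (edges : List (List (String × String))) (n : String) :
    (((pvKept edges).foldl (fun d p => d.modify p.2 [] (fun l => l ++ [p.1]))
        (PySem.Dict.mk [])).getD n []).length = ((pvKept edges).map Prod.snd).count n := by
  have h := PySem.Dict.getD_foldl_modify_append
    ((pvKept edges).map (fun p => (p.2, p.1))) (PySem.Dict.mk []) n
  rw [List.foldl_map] at h
  simp only at h
  rw [h, count_countP_snd]
  simp [List.countP_eq_length_filter, List.filter_map, PySem.Dict.getD, PySem.Dict.get?,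
    Function.comp_def]

-- keys of the folded dicts are exactly the kept sources / targets
lemma mem_keys_outgoing (edges : List (List (String × String))) (n : String) :
    n ∈ ((pvKept edges).foldl (fun d p => d.modify p.1 [] (fun l => l ++ [p.2]))
        (PySem.Dict.mk [])).keys ↔ n ∈ (pvKept edges).map Prod.fst := by
  rw [PySem.Dict.keys_foldl_modify_key (pvKept edges) Prod.fst []
    (fun _ p l => l ++ [p.2]) (PySem.Dict.mk [])]
  rw [PySem.Set.mem_update]
  simp [PySem.Dict.keys]

lemma mem_keys_incoming (edges : List (List (String × String))) (n : String) :
    n ∈ ((pvKept edges).foldl (fun d p => d.modify p.2 [] (fun l => l ++ [p.1]))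
        (PySem.Dict.mk [])).keys ↔ n ∈ (pvKept edges).map Prod.snd := by
  rw [PySem.Dict.keys_foldl_modify_key (pvKept edges) Prod.snd []
    (fun _ p l => l ++ [p.1]) (PySem.Dict.mk [])]
  rw [PySem.Set.mem_update]
  simp [PySem.Dict.keys]

-- A = true  ↔  kept sources and kept targets are each duplicate-free
lemma portA_iff (edges : List (List (String × String))) :
    is_linear_flow_py edges = true ↔
      ((pvKept edges).map Prod.fst).Nodup ∧ ((pvKept edges).map Prod.snd).Nodup := by
  by_cases hnil : edges = []
  · simp [is_linear_flow_py, hnil, pvKept]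
  · simp only [is_linear_flow_py, hnil, if_false, foldA_eq]
    split_ifs with hany
    · constructor
      · intro h; cases h
      · rintro ⟨h1, h2⟩
        rw [List.any_eq_true] at hany
        obtain ⟨n, _, hf⟩ := hany
        rw [List.nodup_iff_count_le_one] at h1 h2
        have hO := getD_outgoing edges n
        have hI := getD_incoming edges n
        have hc1 := h1 n
        have hc2 := h2 n
        rcases (Bool.or_eq_true _ _).mp hf with hgt | hgt <;> simp only [decide_eq_true_eq] at hgt <;> omega
    · simp only [true_iff]
      rw [List.any_eq_true] at hany
      push_neg at hany
      refine ⟨List.nodup_iff_count_le_one.mpr ?_, List.nodup_iff_count_le_one.mpr ?_⟩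
      · intro n
        by_cases hm : n ∈ (pvKept edges).map Prod.fst
        · have hf := hany n (by
            rw [PySem.Set.mem_ofList]
            exact List.mem_append.mpr (Or.inl ((mem_keys_outgoing edges n).mpr hm)))
          have hO := getD_outgoing edges n
          by_contra hgt
          push_neg at hgt
          exact absurd (by simp only [Bool.or_eq_true, decide_eq_true_eq]; omega) hf
        · simp [List.count_eq_zero_of_not_mem hm]
      · intro n
        by_cases hm : n ∈ (pvKept edges).map Prod.snd
        · have hf := hany n (by
            rw [PySem.Set.mem_ofList]
            exact List.mem_append.mpr (Or.inr ((mem_keys_incoming edges n).mpr hm)))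
          have hI := getD_incoming edges n
          by_contra hgt
          push_neg at hgt
          exact absurd (by simp only [Bool.or_eq_true, decide_eq_true_eq]; omega) hf
        · simp [List.count_eq_zero_of_not_mem hm]

-- B = true  ↔  the same, relative to what is already in the seen-sets
lemma pvLinLoop_iff (l : List (List (String × String))) (ss st : PySem.Set String) :
    pvLinLoop ss st l = true ↔
      ((pvKept l).map Prod.fst).Nodup ∧ (∀ x ∈ (pvKept l).map Prod.fst, x ∉ ss) ∧
      ((pvKept l).map Prod.snd).Nodup ∧ (∀ x ∈ (pvKept l).map Prod.snd, x ∉ st) := by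
  induction l generalizing ss st with
  | nil => simp [pvLinLoop, pvKept]
  | cons e rest ih =>
      unfold pvLinLoop
      cases hs : (PySem.Dict.mk e).get? "source" with
      | none =>
          have hkept : pvKept (e :: rest) = pvKept rest := by
            simp [pvKept, hs]
          rw [hkept, ih]
      | some s =>
        cases ht : (PySem.Dict.mk e).get? "target" with
        | none =>
            have hkept : pvKept (e :: rest) = pvKept rest := by
              simp [pvKept, hs, ht]
            rw [hkept, ih]
        | some t =>
          by_cases hs' : s = ""
          · have hkept : pvKept (e :: rest) = pvKept rest := by
              simp [pvKept, hs, ht, hs']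
            have hcond : (decide ¬s = "" && decide ¬t = "") = false := by simp [hs']
            simp only [ne_eq, hcond, Bool.false_eq_true, if_false]
            rw [hkept, ih]
          · by_cases ht' : t = ""
            · have hkept : pvKept (e :: rest) = pvKept rest := by
                simp [pvKept, hs, ht, ht']
              have hcond : (decide ¬s = "" && decide ¬t = "") = false := by simp [ht']
              simp only [ne_eq, hcond, Bool.false_eq_true, if_false]
              rw [hkept, ih]
            · have hkept : pvKept (e :: rest) = (s, t) :: pvKept rest := by
                simp [pvKept, hs, ht, hs', ht']
              have hcond : (decide ¬s = "" && decide ¬t = "") = true := by simp [hs', ht']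
              simp only [ne_eq, hcond, if_true]
              by_cases hseen : (ss.contains s || st.contains t) = true
              · simp only [hseen, if_true, hkept]
                simp only [List.map_cons, List.nodup_cons, List.forall_mem_cons]
                constructor
                · intro h; cases h
                · rintro ⟨_, ⟨hns, _⟩, _, ⟨hnt, _⟩⟩
                  rcases (Bool.or_eq_true _ _).mp hseen with h | h
                  · exact absurd ((PySem.Set.contains_iff ss s).mp h) hns
                  · exact absurd ((PySem.Set.contains_iff st t).mp h) hnt
              · simp only [Bool.not_eq_true] at hseen
                simp only [hseen, Bool.false_eq_true, if_false]
                rw [Bool.or_eq_false_iff] at hseen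
                have hns : s ∉ ss := fun hm => by
                  have h2 := (PySem.Set.contains_iff ss s).mpr hm
                  rw [hseen.1] at h2; cases h2
                have hnt : t ∉ st := fun hm => by
                  have h2 := (PySem.Set.contains_iff st t).mpr hm
                  rw [hseen.2] at h2; cases h2
                rw [ih, hkept]
                simp only [List.map_cons, List.nodup_cons, List.forall_mem_cons]
                constructor
                · rintro ⟨h1, h2, h3, h4⟩
                  have h2' : ∀ x ∈ List.map Prod.fst (pvKept rest), x ∉ ss ∧ x ≠ s := by
                    intro x hx
                    have hy := h2 x hx
                    rw [PySem.Set.mem_add] at hy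
                    push_neg at hy
                    exact hy
                  have h4' : ∀ x ∈ List.map Prod.snd (pvKept rest), x ∉ st ∧ x ≠ t := by
                    intro x hx
                    have hy := h4 x hx
                    rw [PySem.Set.mem_add] at hy
                    push_neg at hy
                    exact hy
                  refine ⟨⟨fun hm => (h2' s hm).2 rfl, h1⟩, ⟨hns, fun x hx => (h2' x hx).1⟩,
                    ⟨fun hm => (h4' t hm).2 rfl, h3⟩, ⟨hnt, fun x hx => (h4' x hx).1⟩⟩
                · rintro ⟨⟨hs1, h1⟩, ⟨_, h2⟩, ⟨ht1, h3⟩, ⟨_, h4⟩⟩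
                  refine ⟨h1, ?_, h3, ?_⟩
                  · intro x hx
                    rw [PySem.Set.mem_add]
                    push_neg
                    exact ⟨h2 x hx, fun he => hs1 (he ▸ hx)⟩
                  · intro x hx
                    rw [PySem.Set.mem_add]
                    push_neg
                    exact ⟨h4 x hx, fun he => ht1 (he ▸ hx)⟩

-- ===== VERDICT (by name: the statement is the Claim_ definition above) =====
theorem is_linear_flow_py_spec : Claim_equal_is_linear_flow_py := by
  intro edges _
  unfold Spec_is_linear_flow_py is_linear_flow_py_alt
  have hB := pvLinLoop_iff edges [] []
  simp only [List.not_mem_nil, not_false_iff, implies_true, and_true] at hB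
  have hB' : pvLinLoop [] [] edges = true ↔
      ((pvKept edges).map Prod.fst).Nodup ∧ ((pvKept edges).map Prod.snd).Nodup := by
    rw [hB]; tauto
  have hA := portA_iff edges
  by_cases h : ((pvKept edges).map Prod.fst).Nodup ∧ ((pvKept edges).map Prod.snd).Nodup
  · rw [hA.mpr h, hB'.mpr h]
  · have h1 : is_linear_flow_py edges ≠ true := fun hc => h (hA.mp hc)
    have h2 : pvLinLoop [] [] edges ≠ true := fun hc => h (hB'.mp hc)
    simp only [Bool.not_eq_true] at h1 h2
    rw [h1, h2]
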